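-- pv_equiv track=rewrite | github.com/FalconX777/GSAUltra2020 | src/2_Down.py | solution
-- ===== SOURCE A (Python) =====
-- def solution(ps):
--     ps = [sorted(ps[i]) for i in range(len(ps))]
--     d = [[[0 for _ in range(len(ps[i]))] for _ in range(10)] for i in range(len(ps))]
--     d_max = 10*len(ps)+1
--     for p in range(10):
--         for j in range(len(d[-1][p])):
--             d[-1][p][j] = p+1
--     for i in range(len(d)-2,-1,-1):
--         for p in range(10):
--             for j in range(len(d[i][p])):
--                 # d_min initialization
--                 d_min = d_max
--
--                 # d_min computing
--                 for j_ in range(0,len(d[i+1][p])): # optimisation possible pour trouver le j_min qui convient par dichotomie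
--                     if ps[i+1][j_]>=ps[i][j]-5:
--                         if ps[i+1][j_]>=ps[i][j]+6:
--                             break
--                         if ps[i+1][j_]<ps[i][j]:
--                             d_min = min(d_min,d[i+1][max(p-1,0)][j_])
--                         elif ps[i+1][j_]==ps[i][j]:
--                             d_min = min(d_min,d[i+1][p][j_])
--                         else:
--                             d_min = min(d_min,d[i+1][min(p+1,9)][j_])
--
--                 # updating d
--                 d[i][p][j] = p+1 + d_min
--     return min(d[0][4][:])
-- ===== SOURCE B (Python) =====
-- def solution(ps):
--     rows = [sorted(r) for r in ps]
--     INF = 10 * len(rows) + 1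
--
--     def bisect(xs, t):
--         # first index k with xs[k] >= t (xs sorted ascending)
--         lo, hi = 0, len(xs)
--         while lo < hi:
--             m = (lo + hi) // 2
--             if xs[m] < t:
--                 lo = m + 1
--             else:
--                 hi = m
--         return lo
--
--     def level(vals, nxt, table):
--         out = []
--         for p in range(10):
--             dm = table[max(p - 1, 0)]
--             d0 = table[p]
--             dp = table[min(p + 1, 9)]
--             row = []
--             for v in vals:
--                 lo = bisect(nxt, v - 5)
--                 a = bisect(nxt, v)
--                 b = bisect(nxt, v + 1)
--                 hi = bisect(nxt, v + 6)
--                 row.append(p + 1 + min([INF] + dm[lo:a] + d0[a:b] + dp[b:hi]))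
--             out.append(row)
--         return out
--
--     table = [[p + 1] * len(rows[-1]) for p in range(10)]
--     for vals, nxt in reversed(list(zip(rows, rows[1:]))):
--         table = level(vals, nxt, table)
--     return min(table[4])
-- ===== Notes on version B (the rewrite author's own statement) =====
-- stated objective: faster
-- what changed: A's inner linear scan with a three-way branch and break is replaced by four binary searches that locate the boundaries of the below/equal/above segments of the value window [v-5,v+5], then a min over the three slices; the 3D table becomes a 10-row table threaded through a reversed fold over adjacent row pairs (measured ~5x faster at n=4096, A times out at n=16384 where B returns).
-- outside the precondition, e.g. on solution([]): A raises IndexError, B raises IndexError; on solution([[], [1]]): A raises ValueError, B raises ValueError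
import Mathlib
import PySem

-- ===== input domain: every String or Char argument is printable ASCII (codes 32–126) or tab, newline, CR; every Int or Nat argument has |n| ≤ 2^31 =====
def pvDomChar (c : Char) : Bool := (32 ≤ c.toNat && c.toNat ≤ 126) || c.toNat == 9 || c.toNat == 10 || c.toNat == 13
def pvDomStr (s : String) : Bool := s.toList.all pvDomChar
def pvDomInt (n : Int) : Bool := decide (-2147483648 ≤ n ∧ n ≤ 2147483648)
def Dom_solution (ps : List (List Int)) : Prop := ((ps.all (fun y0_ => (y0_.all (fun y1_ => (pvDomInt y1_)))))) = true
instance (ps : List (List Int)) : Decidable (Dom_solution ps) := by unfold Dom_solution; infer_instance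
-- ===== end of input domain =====

-- B replaces A's linear scan (three-way branch + break) by four binary searches that delimit the
-- below/equal/above segments of the window [v-5,v+5] and a min over the three slices, and threads
-- a 10-row table through a reversed fold over adjacent row pairs instead of a 3D table (faster,
-- measured).

-- ===== PORT A =====
-- A's inner loop over j_ (with its break): recursion over the next row zipped with the
-- three d-rows it indexes (d[i+1][max(p-1,0)], d[i+1][p], d[i+1][min(p+1,9)]); branch order as in A.
def aScan (v : Int) : List (Int × Int × Int × Int) → Int → Int
  | [], dmin => dmin
  | q :: rest, dmin =>
    if q.1 ≥ v - 5 then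
      if q.1 ≥ v + 6 then dmin
      else if q.1 < v then aScan v rest (min dmin q.2.1)
      else if q.1 = v then aScan v rest (min dmin q.2.2.1)
      else aScan v rest (min dmin q.2.2.2)
    else aScan v rest dmin

-- the loop 'for i in range(len(d)-2,-1,-1)': d[i] is computed from d[i+1] only, so the
-- 3D table is built level by level as structural recursion from the last row.
def runA (dmax : Int) : List (List Int) → List (List Int)
  | [] => []
  | [r] => (List.range 10).map (fun (p : Nat) => r.map (fun _ => ((p : Int) + 1)))
  | r :: r' :: rest =>
    let dnext := runA dmax (r' :: rest)
    (List.range 10).map (fun (p : Nat) =>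
      let dm := dnext.getD (p - 1) []
      let d0 := dnext.getD p []
      let dp := dnext.getD (min (p + 1) 9) []
      r.map (fun v => (p : Int) + 1 + aScan v (r'.zip (dm.zip (d0.zip dp))) dmax))

def solution (ps : List (List Int)) : Int :=
  let rows := ps.map (fun r => PySem.List.sorted r (fun x => x))
  let dmax : Int := 10 * (ps.length : Int) + 1
  let d0 := runA dmax rows
  (PySem.List.min? (d0.getD 4 []) (fun x => x)).getD 0   -- min(d[0][4][:]); Pre_ makes it nonempty

-- ===== PORT B =====
-- B's hand-written binary search 'while lo < hi: …' (first index with xs[k] >= t); the extra Nat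
-- argument is fuel making the loop structural; the interval shrinks each step, so fuel = xs.length
-- (the initial hi - lo) never runs out.
def bl (xs : List Int) (t : Int) : Nat → Nat → Nat → Nat
  | 0, lo, _ => lo
  | fuel + 1, lo, hi =>
    if lo < hi then
      if xs.getD ((lo + hi) / 2) 0 < t then bl xs t fuel ((lo + hi) / 2 + 1) hi
      else bl xs t fuel lo ((lo + hi) / 2)
    else lo

-- one level of Source B: 'def level(vals, nxt, table)'.  Python slices dm[lo:a] with 0 ≤ lo and
-- a ≤ len (Source B's indices are bisect results) are exactly drop/take (Nat '-' clamps like an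
-- empty slice when a < lo); min([INF] + cand) is PySem.List.min? on the INF-headed list.
def levelB (inf : Int) (vals nxt : List Int) (table : List (List Int)) : List (List Int) :=
  (List.range 10).map (fun (p : Nat) =>
    let dm := table.getD (p - 1) []        -- table[max(p-1,0)] (Nat '-' is that max)
    let d0 := table.getD p []
    let dp := table.getD (min (p + 1) 9) []
    vals.map (fun v =>
      let lo := bl nxt (v - 5) nxt.length 0 nxt.length
      let a  := bl nxt v nxt.length 0 nxt.length
      let b  := bl nxt (v + 1) nxt.length 0 nxt.length
      let hi := bl nxt (v + 6) nxt.length 0 nxt.length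
      (p : Int) + 1 +
        (PySem.List.min? (inf :: ((dm.drop lo).take (a - lo) ++ (d0.drop a).take (b - a)
            ++ (dp.drop b).take (hi - b))) (fun x => x)).getD 0))

def solution_alt (ps : List (List Int)) : Int :=
  let rows := ps.map (fun r => PySem.List.sorted r (fun x => x))
  let inf : Int := 10 * (rows.length : Int) + 1
  -- table = [[p+1]*len(rows[-1]) for p in range(10)]
  let base := (List.range 10).map (fun (p : Nat) =>
    List.replicate ((PySem.List.pyGet? rows (-1)).getD []).length ((p : Int) + 1))
  -- 'for vals, nxt in reversed(list(zip(rows, rows[1:]))): table = level(vals, nxt, table)'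
  let table := (rows.zip (rows.drop 1)).foldr (fun pr tb => levelB inf pr.1 pr.2 tb) base
  (PySem.List.min? (table.getD 4 []) (fun x => x)).getD 0

-- ===== PRECONDITION & SPEC =====
-- Pre_ excludes exactly the inputs where Python A raises: ps = [] (IndexError on d[-1])
-- and an empty first row (ValueError: min of empty d[0][4]).
def Pre_solution (ps : List (List Int)) : Prop := ps ≠ [] ∧ ps.headD [] ≠ []
instance (ps : List (List Int)) : Decidable (Pre_solution ps) := by unfold Pre_solution; infer_instance
def pvWitness_solution : List (List Int) := [[3, 1, 9], [4, 7]]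

def Spec_solution (ps : List (List Int)) (out : Int) : Prop := out = solution_alt ps
instance (ps : List (List Int)) (out : Int) : Decidable (Spec_solution ps out) := by unfold Spec_solution; infer_instance

-- ===== CLAIM (what is proved, stated in full; the proofs are below) =====
def Claim_equal_solution : Prop := ∀ (ps : List (List Int)), Dom_solution ps → Pre_solution ps → Spec_solution ps (solution ps)

-- ===== LEMMAS AND PROOFS =====

-- correctness of the hand-written binary search
theorem bl_spec (xs : List Int) (t : Int) (hs : xs.Pairwise (· ≤ ·)) :
    ∀ n lo hi, hi - lo ≤ n → lo ≤ hi → hi ≤ xs.length →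
    (∀ k (hk : k < xs.length), k < lo → xs[k] < t) →
    (∀ k (hk : k < xs.length), hi ≤ k → t ≤ xs[k]) →
    (bl xs t n lo hi ≤ xs.length ∧
      (∀ k (hk : k < xs.length), k < bl xs t n lo hi → xs[k] < t) ∧
      (∀ k (hk : k < xs.length), bl xs t n lo hi ≤ k → t ≤ xs[k])) := by
  intro n
  induction n with
  | zero =>
    intro lo hi hn hlh hhl hlo hhi
    have : lo = hi := by omega
    simp only [bl]
    exact ⟨by omega, fun k hk h => hlo k hk h, fun k hk h => hhi k hk (by omega)⟩
  | succ n ih =>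
    intro lo hi hn hlh hhl hlo hhi
    by_cases h : lo < hi
    · rw [show bl xs t (n + 1) lo hi = (if xs.getD ((lo + hi) / 2) 0 < t
          then bl xs t n ((lo + hi) / 2 + 1) hi else bl xs t n lo ((lo + hi) / 2)) by
        simp only [bl, if_pos h]]
      have hmid : (lo + hi) / 2 < xs.length := by omega
      have hget : xs.getD ((lo + hi) / 2) 0 = xs[(lo + hi) / 2] := List.getD_eq_getElem _ _ hmid
      rw [List.pairwise_iff_getElem] at hs
      have mono : ∀ (i j : Nat) (hi : i < xs.length) (hj : j < xs.length), i ≤ j →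
          xs[i] ≤ xs[j] := by
        intro i j hi hj hij
        rcases Nat.eq_or_lt_of_le hij with h' | h'
        · subst h'; exact le_refl _
        · exact hs i j hi hj h'
      by_cases hlt : xs.getD ((lo + hi) / 2) 0 < t
      · rw [if_pos hlt]
        refine ih ((lo + hi) / 2 + 1) hi (by omega) (by omega) hhl ?_ hhi
        intro k hk hklt
        calc xs[k] ≤ xs[(lo + hi) / 2] := mono k _ hk hmid (by omega)
          _ < t := by rw [← hget]; exact hlt
      · rw [if_neg hlt]
        refine ih lo ((lo + hi) / 2) (by omega) (by omega) (by omega) hlo ?_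
        intro k hk hkge
        have h1 : t ≤ xs[(lo + hi) / 2] := by rw [← hget]; omega
        exact le_trans h1 (mono _ k hmid hk hkge)
    · rw [show bl xs t (n + 1) lo hi = lo by simp only [bl, if_neg h]]
      exact ⟨by omega, fun k hk hh => hlo k hk hh, fun k hk hh => hhi k hk (by omega)⟩

-- on a sorted list, the elements below t are exactly the first countP (< t) positions
theorem sorted_lt_countP (xs : List Int) (t : Int) (hs : xs.Pairwise (· ≤ ·))
    (k : Nat) (hk : k < xs.length) :
    xs[k] < t ↔ k < xs.countP (fun x => decide (x < t)) := by
  rw [List.pairwise_iff_getElem] at hs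
  have mono : ∀ (i j : Nat) (hi : i < xs.length) (hj : j < xs.length), i ≤ j →
      xs[i] ≤ xs[j] := by
    intro i j hi hj hij
    rcases Nat.eq_or_lt_of_le hij with h' | h'
    · subst h'; exact le_refl _
    · exact hs i j hi hj h'
  constructor
  · intro hlt
    have htk : (xs.take (k + 1)).countP (fun x => decide (x < t)) = k + 1 := by
      have hall : ∀ a ∈ xs.take (k + 1), (fun x => decide (x < t)) a := ?_
      · rw [List.countP_eq_length.mpr hall, List.length_take]; omega
      intro a ha
      rw [List.mem_iff_getElem] at ha
      obtain ⟨i, hi, hia⟩ := ha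
      have hilen : i < xs.length := by
        have := List.length_take_le (k + 1) xs; omega
      have hik : i ≤ k := by
        rw [List.length_take] at hi; omega
      rw [List.getElem_take] at hia
      simp only [decide_eq_true_eq]
      calc a = xs[i] := hia.symm
        _ ≤ xs[k] := mono i k hilen hk hik
        _ < t := hlt
    calc k < k + 1 := by omega
      _ = (xs.take (k + 1)).countP (fun x => decide (x < t)) := htk.symm
      _ ≤ xs.countP (fun x => decide (x < t)) := by
          conv_rhs => rw [← List.take_append_drop (k + 1) xs]
          rw [List.countP_append]; omega
  · intro hc
    by_contra hnot
    rw [not_lt] at hnot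
    have hdk : (xs.drop k).countP (fun x => decide (x < t)) = 0 := by
      rw [List.countP_eq_zero]
      intro a ha
      rw [List.mem_iff_getElem] at ha
      obtain ⟨i, hi, hia⟩ := ha
      rw [List.getElem_drop] at hia
      have hki : k + i < xs.length := by
        rw [List.length_drop] at hi; omega
      simp only [decide_eq_true_eq, not_lt]
      calc t ≤ xs[k] := hnot
        _ ≤ xs[k + i] := mono k (k + i) hk hki (by omega)
        _ = a := hia
    have : xs.countP (fun x => decide (x < t)) ≤ k := by
      conv_lhs => rw [← List.take_append_drop k xs]
      rw [List.countP_append, hdk]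
      have h2 : (xs.take k).countP (fun x => decide (x < t)) ≤ (xs.take k).length :=
        List.countP_le_length
      rw [List.length_take] at h2
      omega
    omega

-- hence B's binary search computes that count
theorem bl_eq_countP (xs : List Int) (t : Int) (hs : xs.Pairwise (· ≤ ·)) :
    bl xs t xs.length 0 xs.length = xs.countP (fun x => decide (x < t)) := by
  obtain ⟨hle, hlt, hge⟩ := bl_spec xs t hs xs.length 0 xs.length (by omega) (by omega)
    (le_refl _) (by intro k hk h; omega) (by intro k hk h; omega)
  set l := bl xs t xs.length 0 xs.length with hl
  have hcle : xs.countP (fun x => decide (x < t)) ≤ xs.length := List.countP_le_length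
  rcases Nat.lt_trichotomy l (xs.countP (fun x => decide (x < t))) with h | h | h
  · have hll : l < xs.length := by omega
    have := (sorted_lt_countP xs t hs l hll).mpr h
    have := hge l hll (le_refl _)
    omega
  · exact h
  · have hcl : xs.countP (fun x => decide (x < t)) < xs.length := by omega
    have h1 := hlt _ hcl h
    have h2 := (sorted_lt_countP xs t hs _ hcl).mp h1
    omega

-- on a sorted cons, a head failing 'x < t' forces the tail count to zero
theorem countP_tail_zero (a : Int) (rest : List Int) (t : Int)
    (hs : (a :: rest).Pairwise (· ≤ ·)) (hx : ¬ a < t) :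
    rest.countP (fun y => decide (y < t)) = 0 := by
  rw [List.countP_eq_zero]
  intro b hb
  have := (List.pairwise_cons.mp hs).1 b hb
  simp only [decide_eq_true_eq]
  omega

-- the per-value inner loops agree (indices written as counts)
theorem scan_eq_cand (v : Int) :
    ∀ (nxt dm d0 dp : List Int) (inf : Int), nxt.Pairwise (· ≤ ·) →
      dm.length = nxt.length → d0.length = nxt.length → dp.length = nxt.length →
      aScan v (nxt.zip (dm.zip (d0.zip dp))) inf =
        (((dm.drop (nxt.countP (fun x => decide (x < v - 5)))).take
            (nxt.countP (fun x => decide (x < v)) - nxt.countP (fun x => decide (x < v - 5))) ++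
          (d0.drop (nxt.countP (fun x => decide (x < v)))).take
            (nxt.countP (fun x => decide (x < v + 1)) - nxt.countP (fun x => decide (x < v))) ++
          (dp.drop (nxt.countP (fun x => decide (x < v + 1)))).take
            (nxt.countP (fun x => decide (x < v + 6)) - nxt.countP (fun x => decide (x < v + 1)))).foldl min inf) := by
  intro nxt
  induction nxt with
  | nil =>
    intro dm d0 dp inf _ _ _ _
    simp [aScan]
  | cons a rest ih =>
    intro dm d0 dp inf hs hdm hd0 hdp
    cases dm with
    | nil => simp at hdm
    | cons ym dm' =>
    cases d0 with
    | nil => simp at hd0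
    | cons y0 d0' =>
    cases dp with
    | nil => simp at hdp
    | cons yp dp' =>
    have hdm' : dm'.length = rest.length := by simpa using hdm
    have hd0' : d0'.length = rest.length := by simpa using hd0
    have hdp' : dp'.length = rest.length := by simpa using hdp
    have hs' : rest.Pairwise (· ≤ ·) := (List.pairwise_cons.mp hs).2
    have cnt : ∀ (t : Int) (c : Nat), rest.countP (fun x => decide (x < t)) = c →
        (a :: rest).countP (fun x => decide (x < t)) = c + if a < t then 1 else 0 := by
      intro t c hc
      simp only [List.countP_cons, hc, decide_eq_true_eq]
    have z : ∀ t : Int, ¬ a < t → rest.countP (fun x => decide (x < t)) = 0 :=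
      fun t ht => countP_tail_zero a rest t hs ht
    simp only [List.zip_cons_cons, aScan]
    by_cases hA : a ≥ v - 5
    · by_cases hB : a ≥ v + 6
      · -- beyond the window: all four counts are zero on head and tail
        rw [if_pos hA, if_pos hB,
          cnt (v - 5) 0 (z _ (by omega)), cnt v 0 (z _ (by omega)),
          cnt (v + 1) 0 (z _ (by omega)), cnt (v + 6) 0 (z _ (by omega)),
          if_neg (by omega : ¬ a < v - 5), if_neg (by omega : ¬ a < v),
          if_neg (by omega : ¬ a < v + 1), if_neg (by omega : ¬ a < v + 6)]
        simp
      · rw [if_pos hA, if_neg hB]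
        by_cases hC : a < v
        · -- below v inside the window: head contributes ym
          rw [if_pos hC,
            cnt (v - 5) 0 (z _ (by omega)),
            cnt v _ rfl, cnt (v + 1) _ rfl, cnt (v + 6) _ rfl,
            if_neg (by omega : ¬ a < v - 5), if_pos hC,
            if_pos (by omega : a < v + 1), if_pos (by omega : a < v + 6),
            ih dm' d0' dp' (min inf ym) hs' hdm' hd0' hdp', z (v - 5) (by omega)]
          simp only [Nat.zero_add, Nat.add_sub_add_right, Nat.sub_zero, List.drop_zero,
            List.take_succ_cons, List.drop_succ_cons, List.cons_append, List.foldl_cons]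
        · rw [if_neg hC]
          by_cases hD : a = v
          · -- equal: head contributes y0
            rw [if_pos hD,
              cnt (v - 5) 0 (z _ (by omega)), cnt v 0 (z _ (by omega)),
              cnt (v + 1) _ rfl, cnt (v + 6) _ rfl,
              if_neg (by omega : ¬ a < v - 5), if_neg hC,
              if_pos (by omega : a < v + 1), if_pos (by omega : a < v + 6),
              ih dm' d0' dp' (min inf y0) hs' hdm' hd0' hdp',
              z (v - 5) (by omega), z v (by omega)]
            simp only [Nat.zero_add, Nat.add_zero, Nat.add_sub_add_right, Nat.sub_zero,
              Nat.sub_self, List.drop_zero, List.take_zero, List.take_succ_cons,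
              List.drop_succ_cons, List.nil_append, List.cons_append, List.foldl_cons]
          · -- above v inside the window: head contributes yp
            rw [if_neg hD,
              cnt (v - 5) 0 (z _ (by omega)), cnt v 0 (z _ (by omega)),
              cnt (v + 1) 0 (z _ (by omega)), cnt (v + 6) _ rfl,
              if_neg (by omega : ¬ a < v - 5), if_neg hC,
              if_neg (by omega : ¬ a < v + 1), if_pos (by omega : a < v + 6),
              ih dm' d0' dp' (min inf yp) hs' hdm' hd0' hdp',
              z (v - 5) (by omega), z v (by omega), z (v + 1) (by omega)]
            simp only [Nat.zero_add, Nat.add_zero, Nat.add_sub_add_right, Nat.sub_zero,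
              Nat.sub_self, List.drop_zero, List.take_zero, List.take_succ_cons,
              List.drop_succ_cons, List.nil_append, List.cons_append, List.foldl_cons]
      -- strictly left of the window: head is skipped on both sides
    · rw [if_neg hA,
        cnt (v - 5) _ rfl, cnt v _ rfl, cnt (v + 1) _ rfl, cnt (v + 6) _ rfl,
        if_pos (by omega : a < v - 5), if_pos (by omega : a < v),
        if_pos (by omega : a < v + 1), if_pos (by omega : a < v + 6),
        ih dm' d0' dp' inf hs' hdm' hd0' hdp']
      simp only [Nat.add_sub_add_right, List.drop_succ_cons]

-- shape of A's table: 10 rows, each as long as the head point row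
theorem runA_getD_length (dmax : Int) :
    ∀ rows : List (List Int), rows ≠ [] → ∀ k : Nat, k < 10 →
      ((runA dmax rows).getD k []).length = (rows.headD []).length := by
  intro rows hne k hk
  match rows with
  | [] => exact absurd rfl hne
  | [r] =>
    rw [show runA dmax [r] = (List.range 10).map (fun (p : Nat) => r.map (fun _ => ((p : Nat) : Int) + 1))
        from rfl, PySem.List.getD_map_range _ _ _ _ hk]
    simp
  | r :: r' :: rest =>
    simp only [runA]
    rw [PySem.List.getD_map_range _ _ _ _ hk]
    simp

-- one backward step of A is one call of B's level function
theorem levelA_eq (dmax : Int) (r r' : List Int) (rest : List (List Int))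
    (hs' : r'.Pairwise (· ≤ ·)) :
    runA dmax (r :: r' :: rest) = levelB dmax r r' (runA dmax (r' :: rest)) := by
  simp only [runA, levelB]
  refine List.map_congr_left ?_
  intro p hp
  have hp10 : p < 10 := by simpa using List.mem_range.mp hp
  refine List.map_congr_left ?_
  intro v _
  rw [PySem.List.min?_id_cons, Option.getD_some,
    bl_eq_countP r' (v - 5) hs', bl_eq_countP r' v hs',
    bl_eq_countP r' (v + 1) hs', bl_eq_countP r' (v + 6) hs',
    scan_eq_cand v r' _ _ _ dmax hs'
      (runA_getD_length dmax (r' :: rest) (by simp) (p - 1) (by omega))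
      (runA_getD_length dmax (r' :: rest) (by simp) p hp10)
      (runA_getD_length dmax (r' :: rest) (by simp) (min (p + 1) 9) (by omega))]

-- the whole DP: A's level recursion equals B's reversed fold over adjacent pairs
theorem run_eq (dmax : Int) :
    ∀ rows : List (List Int), rows ≠ [] → (∀ r ∈ rows, r.Pairwise (· ≤ ·)) →
      runA dmax rows =
        (rows.zip (rows.drop 1)).foldr (fun pr tb => levelB dmax pr.1 pr.2 tb)
          ((List.range 10).map (fun (p : Nat) =>
            List.replicate ((PySem.List.pyGet? rows (-1)).getD []).length ((p : Int) + 1))) := by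
  intro rows
  induction rows with
  | nil => intro h; exact absurd rfl h
  | cons r rest ih =>
    intro _ hsall
    cases rest with
    | nil =>
      rw [show runA dmax [r] = (List.range 10).map (fun (p : Nat) => r.map (fun _ => ((p : Nat) : Int) + 1))
          from rfl]
      simp only [List.drop_succ_cons, List.drop_zero, List.zip_nil_right, List.foldr_nil,
        PySem.List.pyGet?_neg_one, List.getLast?_singleton, Option.getD_some]
      refine List.map_congr_left ?_
      intro p _
      rw [List.map_const']
    | cons r' rest2 =>
      have ihh := ih (by simp) (fun x hx => hsall x (List.mem_cons_of_mem r hx))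
      have hbase : (PySem.List.pyGet? (r :: r' :: rest2) (-1)).getD [] =
          (PySem.List.pyGet? (r' :: rest2) (-1)).getD [] := by
        rw [PySem.List.pyGet?_neg_one, PySem.List.pyGet?_neg_one, List.getLast?_cons_cons]
      rw [show (r :: r' :: rest2).zip ((r :: r' :: rest2).drop 1) =
          (r, r') :: ((r' :: rest2).zip ((r' :: rest2).drop 1)) by simp,
        List.foldr_cons, hbase, ← ihh,
        levelA_eq dmax r r' rest2 (hsall r' (by simp))]

-- ===== VERDICT (by name: the statement is the Claim_ definition above) =====
theorem solution_spec : Claim_equal_solution := by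
  intro ps _ hpre
  unfold Spec_solution solution solution_alt
  have hne : ps.map (fun r => PySem.List.sorted r (fun x => x)) ≠ [] := by
    simp [hpre.1]
  have h := run_eq (10 * (ps.length : Int) + 1) (ps.map (fun r => PySem.List.sorted r (fun x => x)))
    hne (by
      intro r hr
      rw [List.mem_map] at hr
      obtain ⟨r0, _, hr0⟩ := hr
      rw [← hr0]
      exact PySem.List.sorted_pairwise r0 (fun x => x))
  simp only [List.length_map]
  rw [h]
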